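-- pv_equiv track=rewrite | github.com/arpiagar/HackerEarth | qb/test1.py | numberOfWays1
-- ===== SOURCE A (Python) =====
-- import math
--
-- def numberOfWays1(n):
--     count = n//3
--     num_ways = 0
--     for i in range(0, count+1):
--         count_of_threes = i
--         count_of_ones = n - count_of_threes * 3
--         num_ways += ncr((count_of_ones+count_of_threes), count_of_threes)
--     return num_ways % 1000000007
--
-- def ncr(n,r):
--     f = math.factorial
--     return f(n)//(f(r)*f(n-r))
-- ===== SOURCE B (Python) =====
-- def numberOfWays1(n):
--     # Linear DP: w(k) = w(k-1) + w(k-3), seeded (1, 0, 0), modded each step.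
--     if n < 0:
--         return 0
--     M = 1000000007
--     a, b, c = 1, 0, 0
--     for _ in range(n):
--         a, b, c = (a + c) % M, a, b
--     return a
-- ===== Notes on version B (the rewrite author's own statement) =====
-- stated objective: faster
-- what changed: Replaced the sum of binomial coefficients built from big factorials with the linear recurrence w(k)=w(k-1)+w(k-3) computed iteratively, reduced by the same prime modulus at each step, with O(1) word-size state.
import Mathlib
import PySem

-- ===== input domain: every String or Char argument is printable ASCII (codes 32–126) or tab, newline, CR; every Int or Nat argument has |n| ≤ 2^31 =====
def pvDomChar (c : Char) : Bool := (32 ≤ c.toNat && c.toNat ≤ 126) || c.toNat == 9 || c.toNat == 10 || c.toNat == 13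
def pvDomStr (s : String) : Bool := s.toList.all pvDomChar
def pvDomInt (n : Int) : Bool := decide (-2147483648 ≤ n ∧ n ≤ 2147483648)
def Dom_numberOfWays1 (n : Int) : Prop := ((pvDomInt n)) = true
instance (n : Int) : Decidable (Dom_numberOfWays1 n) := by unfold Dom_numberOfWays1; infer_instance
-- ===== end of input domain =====

-- B replaces A's sum of binomial coefficients (big factorials) with the linear
-- recurrence w(k) = w(k-1) + w(k-3) iterated with per-step modular reduction (objective: faster).

-- ===== PORT A =====
-- math.factorial; A only applies it to nonnegative arguments, where .toNat is exact
def pvFact (m : Int) : Int := (Nat.factorial m.toNat : Int)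

def pvNcr (n r : Int) : Int := PySem.Int.floordiv (pvFact n) (pvFact r * pvFact (n - r))

def numberOfWays1 (n : Int) : Int :=
  let count := PySem.Int.floordiv n 3
  let num_ways := (PySem.List.pyRange 0 (count + 1) 1).foldl
    (fun num_ways i => num_ways + pvNcr ((n - i * 3) + i) i) 0
  PySem.Int.mod num_ways 1000000007

-- ===== PORT B =====
def pvStep (s : Int × Int × Int) : Int × Int × Int :=
  (PySem.Int.mod (s.1 + s.2.2) 1000000007, s.1, s.2.1)

def numberOfWays1_alt (n : Int) : Int :=
  if n < 0 then 0 else (pvStep^[n.toNat] (1, 0, 0)).1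

-- ===== PRECONDITION & SPEC =====
def Spec_numberOfWays1 (n : Int) (out : Int) : Prop := out = numberOfWays1_alt n
instance (n : Int) (out : Int) : Decidable (Spec_numberOfWays1 n out) := by unfold Spec_numberOfWays1; infer_instance

-- ===== CLAIM (what is proved, stated in full; the proofs are below) =====
def Claim_equal_numberOfWays1 : Prop := ∀ (n : Int), Dom_numberOfWays1 n → Spec_numberOfWays1 n (numberOfWays1 n)

-- ===== LEMMAS AND PROOFS =====

-- unmodded tribonacci-style state machine and its first component
def tribStep (s : Nat × Nat × Nat) : Nat × Nat × Nat := (s.1 + s.2.2, s.1, s.2.1)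

def W (k : Nat) : Nat := (tribStep^[k] (1, 0, 0)).1

-- A's binomial sum, over Nat
def gsum (m : Nat) : Nat := ∑ i ∈ Finset.range (m / 3 + 1), Nat.choose (m - 2 * i) i

lemma trib_state (k : Nat) : tribStep^[k + 2] (1, 0, 0) = (W (k + 2), W (k + 1), W k) := by
  induction k with
  | zero => decide
  | succ j ih =>
      have h1 : tribStep^[j + 3] (1, 0, 0) = tribStep (tribStep^[j + 2] (1, 0, 0)) := by
        rw [Function.iterate_succ_apply']
      have h2 : W (j + 3) = W (j + 2) + W j := by
        unfold W; rw [h1, ih]; rfl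
      calc tribStep^[j + 1 + 2] (1, 0, 0) = tribStep (tribStep^[j + 2] (1, 0, 0)) := by
            rw [Function.iterate_succ_apply']
        _ = (W (j + 2) + W j, W (j + 2), W (j + 1)) := by rw [ih]; rfl
        _ = (W (j + 3), W (j + 2), W (j + 1)) := by rw [h2]

lemma W_rec (k : Nat) : W (k + 3) = W (k + 2) + W k := by
  have := trib_state k
  unfold W
  rw [show k + 3 = (k + 2) + 1 from rfl, Function.iterate_succ_apply', this]
  rfl

lemma gsum_rec (m : Nat) : gsum (m + 3) = gsum (m + 2) + gsum m := by
  unfold gsum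
  have hdiv : (m + 3) / 3 + 1 = (m / 3 + 1) + 1 := by omega
  rw [hdiv, Finset.sum_range_succ']
  have hL : ∀ j ∈ Finset.range (m / 3 + 1), (m + 3 - 2 * (j + 1)).choose (j + 1)
      = (m - 2 * j).choose j + (m - 2 * j).choose (j + 1) := by
    intro j hj
    simp only [Finset.mem_range] at hj
    have h2 : 2 * j ≤ m := by omega
    have he : m + 3 - 2 * (j + 1) = (m - 2 * j) + 1 := by omega
    rw [he, Nat.choose_succ_succ]
  rw [Finset.sum_congr rfl hL, Finset.sum_add_distrib]
  rw [Finset.sum_range_succ' (fun i => (m + 2 - 2 * i).choose i) ((m + 2) / 3)]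
  have hR : ∀ j ∈ Finset.range ((m + 2) / 3), (m + 2 - 2 * (j + 1)).choose (j + 1)
      = (m - 2 * j).choose (j + 1) := by
    intro j _
    congr 1
    omega
  rw [Finset.sum_congr rfl hR]
  have hsub : ∑ j ∈ Finset.range (m / 3 + 1), (m - 2 * j).choose (j + 1)
      = ∑ j ∈ Finset.range ((m + 2) / 3), (m - 2 * j).choose (j + 1) := by
    refine (Finset.sum_subset ?_ ?_).symm
    · intro x hx
      simp only [Finset.mem_range] at *
      omega
    · intro x hx hnx
      simp only [Finset.mem_range] at hx hnx
      exact Nat.choose_eq_zero_of_lt (by omega)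
  rw [hsub]
  simp only [Nat.mul_zero, Nat.sub_zero, Nat.choose_zero_right]
  omega

lemma gsum_eq_W (m : Nat) : gsum m = W m := by
  induction m using Nat.strong_induction_on with
  | _ m ih =>
    match m with
    | 0 => decide
    | 1 => decide
    | 2 => decide
    | (k + 3) =>
        rw [gsum_rec, W_rec, ih (k + 2) (by omega), ih k (by omega)]

-- modded Int state tracks the Nat state componentwise mod M
lemma pvStep_state (k : Nat) :
    pvStep^[k] (1, 0, 0) =
      ((((tribStep^[k] (1, 0, 0)).1 % 1000000007 : Nat) : Int),
       (((tribStep^[k] (1, 0, 0)).2.1 % 1000000007 : Nat) : Int),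
       (((tribStep^[k] (1, 0, 0)).2.2 % 1000000007 : Nat) : Int)) := by
  induction k with
  | zero => rfl
  | succ j ih =>
      rw [Function.iterate_succ_apply', Function.iterate_succ_apply', ih]
      unfold pvStep tribStep
      have hM : (0 : Int) < 1000000007 := by norm_num
      refine Prod.ext ?_ (Prod.ext rfl rfl)
      simp only
      rw [PySem.Int.mod_eq_emod_of_pos hM]
      push_cast
      conv_rhs => rw [Int.add_emod]

lemma pvNcr_natCast (a r : Nat) (h : r ≤ a) : pvNcr (a : Int) (r : Int) = (a.choose r : Int) := by
  unfold pvNcr pvFact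
  have hsub : ((a : Int) - r) = ((a - r : Nat) : Int) := by omega
  rw [hsub]
  simp only [Int.toNat_natCast]
  rw [← Nat.cast_mul, PySem.Int.floordiv_natCast]
  rw [Nat.choose_eq_factorial_div_factorial h]

lemma foldA (m : Nat) (N : Nat) (hN : N ≤ m / 3 + 1) :
    (List.range N).foldl (fun (acc : Int) (k : Nat) => acc + pvNcr (((m : Int) - (k : Int) * 3) + (k : Int)) (k : Int)) 0
      = ((∑ i ∈ Finset.range N, Nat.choose (m - 2 * i) i : Nat) : Int) := by
  induction N with
  | zero => simp
  | succ j ih =>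
      rw [List.range_succ, List.foldl_append, ih (by omega), Finset.sum_range_succ]
      simp only [List.foldl_cons, List.foldl_nil]
      have h3 : 3 * j ≤ m := by omega
      have harg : ((m : Int) - j * 3) + j = ((m - 2 * j : Nat) : Int) := by omega
      rw [harg, pvNcr_natCast _ _ (by omega)]
      push_cast
      ring

-- ===== VERDICT (by name: the statement is the Claim_ definition above) =====
theorem numberOfWays1_spec : Claim_equal_numberOfWays1 := by
  intro n _
  unfold Spec_numberOfWays1
  show numberOfWays1 n = numberOfWays1_alt n
  rw [numberOfWays1]
  unfold numberOfWays1_alt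
  by_cases hn : n < 0
  · have hc : PySem.Int.floordiv n 3 + 1 ≤ 0 := by
      have := (PySem.Int.floordiv_lt_iff_lt_mul (a := n) (b := 3) (q := 0) (by norm_num)).2
        (by omega)
      omega
    rw [PySem.List.pyRange_one_eq_nil hc]
    simp [hn, PySem.Int.mod]
  · rw [if_neg hn]
    obtain ⟨m, rfl⟩ : ∃ m : Nat, n = (m : Int) := ⟨n.toNat, (Int.toNat_of_nonneg (by omega)).symm⟩
    have hfd : PySem.Int.floordiv (m : Int) 3 = ((m / 3 : Nat) : Int) := by
      exact_mod_cast PySem.Int.floordiv_natCast m 3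
    rw [hfd, PySem.List.pyRange_one]
    have hlen : ((((m / 3 : Nat) : Int) + 1) - 0).toNat = m / 3 + 1 := by omega
    rw [hlen, List.foldl_map]
    simp only [zero_add]
    rw [foldA m (m / 3 + 1) le_rfl]
    rw [Int.toNat_natCast, pvStep_state]
    simp only
    rw [show (∑ i ∈ Finset.range (m / 3 + 1), Nat.choose (m - 2 * i) i) = W m from gsum_eq_W m]
    rw [PySem.Int.mod_eq_emod_of_pos (by norm_num)]
    have hw : ((tribStep^[m] (1, 0, 0)).1 : Nat) = W m := rfl
    rw [hw]
    omega
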